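-- pv_equiv track=rewrite | github.com/KaviyanJ/AutoSend | app.py | best_email
-- ===== SOURCE A (Python) =====
-- from typing import List, Dict, Any, Set, Tuple
--
-- def best_email(emails: List[str]) -> str | None:
--     if not emails:
--         return None
--     pri = ["careers","career","jobs","intern","hr","recruit","talent","engineering","info","contact"]
--     def score(e):
--         loc = e.split("@",1)[0].lower()
--         for i, t in enumerate(pri):
--             if t in loc:
--                 return len(pri) - i
--         return 0
--     return sorted(emails, key=lambda e: (score(e), e.lower()), reverse=True)[0]
-- ===== SOURCE B (Python) =====
-- from typing import List
--
-- def best_email(emails: List[str]) -> str | None: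
--     if not emails:
--         return None
--     pri = ["careers","career","jobs","intern","hr","recruit","talent","engineering","info","contact"]
--     def score(e):
--         loc = e.split("@", 1)[0].lower()
--         hit = next((i for i, t in enumerate(pri) if t in loc), None)
--         return len(pri) - hit if hit is not None else 0
--     best = score(emails[0])
--     for e in emails[1:]:
--         best = max(best, score(e))
--     winner = None
--     for e in emails:
--         if score(e) == best:
--             if winner is None or winner.lower() < e.lower():
--                 winner = e
--     return winner
-- ===== Notes on version B (the rewrite author's own statement) =====
-- stated objective: alternative
-- what changed: Replaces A's full reverse sort on the tuple key (score, e.lower()) followed by [0] with two linear passes: first compute the maximum score, then among emails attaining it keep the first one with the greatest lowered form (recomputing score per email, so it is not faster in practice).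
import Mathlib
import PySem

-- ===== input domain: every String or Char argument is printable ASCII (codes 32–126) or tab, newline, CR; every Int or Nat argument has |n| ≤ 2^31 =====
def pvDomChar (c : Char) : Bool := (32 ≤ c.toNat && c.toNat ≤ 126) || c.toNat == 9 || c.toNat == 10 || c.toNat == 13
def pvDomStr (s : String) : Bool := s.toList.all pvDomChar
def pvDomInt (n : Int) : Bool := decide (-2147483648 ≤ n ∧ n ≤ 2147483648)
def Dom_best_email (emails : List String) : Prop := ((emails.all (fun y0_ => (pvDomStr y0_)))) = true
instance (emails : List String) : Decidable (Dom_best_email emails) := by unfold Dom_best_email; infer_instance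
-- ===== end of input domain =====

-- B replaces A's full reverse sort on (score, lowered email) + [0] by two linear passes:
-- first the maximum score, then the lexicographically largest lowered email among max-score
-- emails (keeping the earlier one on ties) — same result, no sort.

-- ===== PORT A =====
def pvPri : List String := ["careers","career","jobs","intern","hr","recruit","talent","engineering","info","contact"]

-- the inner 'for i, t in enumerate(pri): if t in loc: return len(pri)-i / return 0'
def pvScoreLoop (loc : String) : List (Int × String) → Int
  | [] => 0
  | (i, t) :: rest => if PySem.Str.isIn t loc then (pvPri.length : Int) - i else pvScoreLoop loc rest

-- score(e): loc = e.split("@",1)[0].lower(); first matching priority keyword wins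
def pvScore (e : String) : Int :=
  let loc := PySem.Str.lower (((PySem.Str.splitMax? e "@" 1).getD []).headD "")
  pvScoreLoop loc (PySem.List.enumerate pvPri 0)

def best_email (emails : List String) : Option String :=
  if emails = [] then none
  else (PySem.List.sorted2 emails (fun e => pvScore e) (fun e => PySem.Str.lower e) true).head?

-- ===== PORT B =====
-- same keyword table; score written via 'next((i for i,t in enumerate(pri) if t in loc), None)'
def pvScoreB (e : String) : Int :=
  let loc := PySem.Str.lower (((PySem.Str.splitMax? e "@" 1).getD []).headD "")
  match (PySem.List.enumerate pvPri 0).find? (fun it => PySem.Str.isIn it.2 loc) with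
  | some it => (pvPri.length : Int) - it.1
  | none => 0

def best_email_alt (emails : List String) : Option String :=
  match emails with
  | [] => none
  | e0 :: rest =>
    -- pass 1: best = running max of score over emails
    let best := rest.foldl (fun b e => max b (pvScoreB e)) (pvScoreB e0)
    -- pass 2: among emails whose score equals best, keep the one with the greatest
    -- lowered form; on equal lowered forms keep the earlier one
    (e0 :: rest).foldl (fun w e =>
      if pvScoreB e = best then
        match w with
        | none => some e
        | some m => if PySem.Str.lower m < PySem.Str.lower e then some e else some m
      else w) none

-- ===== PRECONDITION & SPEC =====
def Spec_best_email (emails : List String) (out : Option String) : Prop := out = best_email_alt emails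
instance (emails : List String) (out : Option String) : Decidable (Spec_best_email emails out) := by unfold Spec_best_email; infer_instance

-- ===== CLAIM (what is proved, stated in full; the proofs are below) =====
def Claim_equal_best_email : Prop := ∀ (emails : List String), Dom_best_email emails → Spec_best_email emails (best_email emails)

-- ===== LEMMAS AND PROOFS =====

-- B's find?-based score equals A's loop-based score
lemma scoreLoop_eq_find (loc : String) (l : List (Int × String)) :
    pvScoreLoop loc l = (match l.find? (fun it => PySem.Str.isIn it.2 loc) with
      | some it => (pvPri.length : Int) - it.1
      | none => 0) := by
  induction l with
  | nil => rfl
  | cons p rest ih =>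
    obtain ⟨i, t⟩ := p
    simp only [pvScoreLoop, List.find?]
    cases h : PySem.Str.isIn t loc
    · simp [ih]
    · simp

lemma pvScoreB_eq (e : String) : pvScoreB e = pvScore e := by
  unfold pvScoreB pvScore
  exact (scoreLoop_eq_find
    (PySem.Str.lower (((PySem.Str.splitMax? e "@" 1).getD []).headD ""))
    (PySem.List.enumerate pvPri 0)).symm

-- head of an insertion-sort fold = running first-maximum fold over the same 'before' test
lemma head?_foldl_insertBy {α : Type} (before : α → α → Bool) (xs : List α) (acc : List α) :
    (List.foldl (fun a x => PySem.List.insertBy before x a) acc xs).head? =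
    List.foldl (fun o x => match o with
      | none => some x
      | some m => if before x m then some x else some m) acc.head? xs := by
  induction xs generalizing acc with
  | nil => rfl
  | cons x xs ih =>
    simp only [List.foldl]
    rw [ih]
    congr 1
    cases acc with
    | nil => rfl
    | cons y ys =>
      simp only [PySem.List.insertBy, List.head?_cons]
      cases h : before x y <;> simp_all

lemma head?_sorted2_rev {α κ₁ κ₂ : Type} [LT κ₁] [DecidableLT κ₁] [LT κ₂] [DecidableLT κ₂]
    (xs : List α) (k1 : α → κ₁) (k2 : α → κ₂) :
    (PySem.List.sorted2 xs k1 k2 true).head? = PySem.List.max2? xs k1 k2 := by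
  simp only [PySem.List.sorted2, PySem.List.max2?]
  rw [head?_foldl_insertBy]
  rfl

-- abbreviations for the two fold steps (proof-local)
def stepA (f : String → Int) (g : String → String) (o : Option String) (x : String) : Option String :=
  match o with
  | none => some x
  | some m =>
    if (decide (f m < f x) || !decide (f x < f m) && decide (g m < g x)) = true then some x else some m

def stepB (f : String → Int) (g : String → String) (M : Int) (w : Option String) (x : String) : Option String :=
  if f x = M then
    match w with
    | none => some x
    | some m => if g m < g x then some x else some m
  else w

-- invariant relating the two accumulators
def FirstD (f : String → Int) (M : Int) (o w : Option String) : Prop :=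
  o = w ∧ ∃ a, o = some a ∧ f a = M
def SecondD (f : String → Int) (M : Int) (o w : Option String) : Prop :=
  w = none ∧ ∀ a, o = some a → f a < M

lemma step_first (f : String → Int) (g : String → String) (M : Int) (x : String)
    (o w : Option String) (h : FirstD f M o w) (hx : f x ≤ M) :
    FirstD f M (stepA f g o x) (stepB f g M w x) := by
  obtain ⟨rfl, a, rfl, hfa⟩ := h
  by_cases hxM : f x = M
  · have h1 : decide (f a < f x) = false := by simp only [decide_eq_false_iff_not]; omega
    have h2 : decide (f x < f a) = false := by simp only [decide_eq_false_iff_not]; omega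
    have hA : stepA f g (some a) x = if g a < g x then some x else some a := by
      simp only [stepA]; rw [h1, h2]; simp
    have hB : stepB f g M (some a) x = if g a < g x then some x else some a := by
      simp only [stepB, if_pos hxM]
    refine ⟨hA.trans hB.symm, ?_⟩
    by_cases hg : g a < g x
    · exact ⟨x, by rw [hA, if_pos hg], hxM⟩
    · exact ⟨a, by rw [hA, if_neg hg], hfa⟩
  · have hlt : f x < M := lt_of_le_of_ne hx hxM
    have h1 : decide (f a < f x) = false := by simp only [decide_eq_false_iff_not]; omega
    have h2 : decide (f x < f a) = true := by simp only [decide_eq_true_eq]; omega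
    have hA : stepA f g (some a) x = some a := by
      simp only [stepA]; rw [h1, h2]; simp
    have hB : stepB f g M (some a) x = some a := by
      simp only [stepB, if_neg hxM]
    exact ⟨hA.trans hB.symm, a, hA, hfa⟩

lemma step_second (f : String → Int) (g : String → String) (M : Int) (x : String)
    (o w : Option String) (h : SecondD f M o w) (hx : f x ≤ M) :
    (f x = M → FirstD f M (stepA f g o x) (stepB f g M w x)) ∧
    (f x ≠ M → SecondD f M (stepA f g o x) (stepB f g M w x)) := by
  obtain ⟨rfl, ho⟩ := h
  constructor
  · intro hxM
    cases o with
    | none =>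
      have hA : stepA f g none x = some x := rfl
      have hB : stepB f g M none x = some x := by simp [stepB, hxM]
      exact ⟨hA.trans hB.symm, x, hA, hxM⟩
    | some m =>
      have hm := ho m rfl
      have h1 : decide (f m < f x) = true := by simp only [decide_eq_true_eq]; omega
      have hA : stepA f g (some m) x = some x := by simp only [stepA]; rw [h1]; simp
      have hB : stepB f g M none x = some x := by simp [stepB, hxM]
      exact ⟨hA.trans hB.symm, x, hA, hxM⟩
  · intro hxM
    have hlt : f x < M := lt_of_le_of_ne hx hxM
    cases o with
    | none =>
      refine ⟨by simp [stepB, hxM], ?_⟩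
      intro a ha
      simp only [stepA] at ha
      cases ha; exact hlt
    | some m =>
      have hm := ho m rfl
      refine ⟨by simp [stepB, hxM], ?_⟩
      intro a ha
      simp only [stepA] at ha
      split at ha <;> (cases ha; first | exact hlt | exact hm)

lemma first_fold (f : String → Int) (g : String → String) (M : Int) :
    ∀ (xs : List String) (o w : Option String), FirstD f M o w → (∀ x ∈ xs, f x ≤ M) →
    FirstD f M (xs.foldl (stepA f g) o) (xs.foldl (stepB f g M) w) := by
  intro xs
  induction xs with
  | nil => intro o w h _; exact h
  | cons x t ih =>
    intro o w h hb
    simp only [List.foldl]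
    exact ih _ _ (step_first f g M x o w h (hb x (by simp))) (fun y hy => hb y (by simp [hy]))

lemma inv_fold (f : String → Int) (g : String → String) (M : Int) :
    ∀ (xs : List String) (o w : Option String),
    (FirstD f M o w ∨ SecondD f M o w) → (∀ x ∈ xs, f x ≤ M) → (∃ x ∈ xs, f x = M) →
    FirstD f M (xs.foldl (stepA f g) o) (xs.foldl (stepB f g M) w) := by
  intro xs
  induction xs with
  | nil => intro o w _ _ hm; simp at hm
  | cons x t ih =>
    intro o w h hb hm
    have hx : f x ≤ M := hb x (by simp)
    have hbt : ∀ y ∈ t, f y ≤ M := fun y hy => hb y (by simp [hy])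
    simp only [List.foldl]
    by_cases hxM : f x = M
    · have hfirst : FirstD f M (stepA f g o x) (stepB f g M w x) := by
        rcases h with h | h
        · exact step_first f g M x o w h hx
        · exact (step_second f g M x o w h hx).1 hxM
      exact first_fold f g M t _ _ hfirst hbt
    · rcases h with h | h
      · exact first_fold f g M t _ _ (step_first f g M x o w h hx) hbt
      · have hsec := (step_second f g M x o w h hx).2 hxM
        have hmt : ∃ y ∈ t, f y = M := by
          rcases hm with ⟨y, hy, hyM⟩
          rcases List.mem_cons.mp hy with rfl | hy
          · exact absurd hyM hxM
          · exact ⟨y, hy, hyM⟩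
        exact ih _ _ (Or.inr hsec) hbt hmt

-- facts about the running-max pass
lemma le_foldl_max_init (f : String → Int) :
    ∀ (t : List String) (b : Int), b ≤ t.foldl (fun acc e => max acc (f e)) b := by
  intro t
  induction t with
  | nil => intro b; simp
  | cons x t ih =>
    intro b
    simp only [List.foldl]
    exact le_trans (le_max_left _ _) (ih _)

lemma le_foldl_max_mem (f : String → Int) :
    ∀ (t : List String) (b : Int) (x : String), x ∈ t → f x ≤ t.foldl (fun acc e => max acc (f e)) b := by
  intro t
  induction t with
  | nil => intro b x hx; simp at hx
  | cons y t ih =>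
    intro b x hx
    simp only [List.foldl]
    rcases List.mem_cons.mp hx with rfl | hx
    · exact le_trans (le_max_right _ _) (le_foldl_max_init f t _)
    · exact ih _ _ hx

lemma foldl_max_attained (f : String → Int) :
    ∀ (t : List String) (b : Int),
    t.foldl (fun acc e => max acc (f e)) b = b ∨ ∃ x ∈ t, f x = t.foldl (fun acc e => max acc (f e)) b := by
  intro t
  induction t with
  | nil => intro b; exact Or.inl rfl
  | cons y t ih =>
    intro b
    simp only [List.foldl]
    rcases ih (max b (f y)) with h | ⟨x, hx, hfx⟩
    · rcases max_choice b (f y) with hm | hm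
      · exact Or.inl (by rw [h, hm])
      · exact Or.inr ⟨y, by simp, by rw [h, hm]⟩
    · exact Or.inr ⟨x, by simp [hx], hfx⟩

-- the two-pass scan computes max2? on a nonempty list
lemma two_pass_eq_max2 (f : String → Int) (g : String → String) (e0 : String) (rest : List String) :
    PySem.List.max2? (e0 :: rest) f g =
    (e0 :: rest).foldl (stepB f g (rest.foldl (fun b e => max b (f e)) (f e0))) none := by
  set M := rest.foldl (fun b e => max b (f e)) (f e0) with hM
  have hA : PySem.List.max2? (e0 :: rest) f g = (e0 :: rest).foldl (stepA f g) none := by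
    simp only [PySem.List.max2?]
    exact List.foldl_ext _ _ none (fun o x _ => by cases o <;> rfl)
  have hle : ∀ x ∈ e0 :: rest, f x ≤ M := by
    intro x hx
    rcases List.mem_cons.mp hx with rfl | hx
    · exact le_foldl_max_init f rest _
    · exact le_foldl_max_mem f rest _ _ hx
  have hmem : ∃ x ∈ e0 :: rest, f x = M := by
    rcases foldl_max_attained f rest (f e0) with h | ⟨x, hx, hfx⟩
    · exact ⟨e0, by simp, h.symm⟩
    · exact ⟨x, by simp [hx], hfx⟩
  have := inv_fold f g M (e0 :: rest) none none
    (Or.inr ⟨rfl, by simp⟩) hle hmem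
  rw [hA]
  exact this.1

-- ===== VERDICT (by name: the statement is the Claim_ definition above) =====
theorem best_email_spec : Claim_equal_best_email := by
  intro emails _
  unfold Spec_best_email best_email best_email_alt
  cases emails with
  | nil => rfl
  | cons e0 rest =>
    simp only [pvScoreB_eq, if_neg (List.cons_ne_nil e0 rest)]
    rw [head?_sorted2_rev, two_pass_eq_max2 pvScore (fun e => PySem.Str.lower e) e0 rest]
    exact List.foldl_ext _ _ none (fun w e _ => by cases w <;> rfl)
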